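-- pv_equiv track=rewrite | github.com/testJota/mininet-distributed-system-simulation | launchMesh.py | orderSwitches
-- ===== SOURCE A (Python) =====
-- def orderSwitches(s, nSwitches):
-- 	orderDict = {}
-- 	counter = 1
-- 	for i in range(nSwitches):
-- 		if i != s:
-- 			orderDict[i] = counter
-- 			counter += 1
-- 	return orderDict
-- ===== SOURCE B (Python) =====
-- def orderSwitches(s, nSwitches):
--     # closed form: a kept index i sits at position i+1, minus one if s precedes it
--     return {i: (i if 0 <= s < i else i + 1) for i in range(nSwitches) if i != s}
-- ===== Notes on version B (the rewrite author's own statement) =====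
-- stated objective: simpler
-- what changed: Replaces the accumulator loop with its running counter by a single dict comprehension that computes each order number in closed form from the index (i if 0 <= s < i else i+1).
import Mathlib
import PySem

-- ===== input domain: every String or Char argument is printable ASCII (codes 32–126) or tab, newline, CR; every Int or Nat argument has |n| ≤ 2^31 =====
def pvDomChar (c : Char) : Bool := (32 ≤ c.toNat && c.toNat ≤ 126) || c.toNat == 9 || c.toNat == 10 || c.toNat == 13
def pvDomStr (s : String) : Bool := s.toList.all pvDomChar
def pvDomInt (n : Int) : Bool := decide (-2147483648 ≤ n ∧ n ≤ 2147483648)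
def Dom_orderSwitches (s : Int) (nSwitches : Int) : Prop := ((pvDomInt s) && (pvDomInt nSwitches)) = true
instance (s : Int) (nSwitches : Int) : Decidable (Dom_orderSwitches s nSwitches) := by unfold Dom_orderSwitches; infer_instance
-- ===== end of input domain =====

-- B replaces A's running counter with a closed-form value per index; same return value, no side effects.
-- ===== PORT A =====
def orderSwitches (s : Int) (nSwitches : Int) : List (Int × Int) :=
  let st := (PySem.List.pyRange 0 nSwitches 1).foldl
    (fun (st : PySem.Dict Int Int × Int) i =>
      if i ≠ s then (st.1.insert i st.2, st.2 + 1) else st)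
    (PySem.Dict.empty, 1)
  st.1.items

-- ===== PORT B =====
def orderSwitches_alt (s : Int) (nSwitches : Int) : List (Int × Int) :=
  ((PySem.List.pyRange 0 nSwitches 1).filter (fun i => i ≠ s)).map
    (fun i => (i, if 0 ≤ s ∧ s < i then i else i + 1))

-- ===== PRECONDITION & SPEC =====
def Spec_orderSwitches (s : Int) (nSwitches : Int) (out : List (Int × Int)) : Prop := out = orderSwitches_alt s nSwitches
instance (s : Int) (nSwitches : Int) (out : List (Int × Int)) : Decidable (Spec_orderSwitches s nSwitches out) := by unfold Spec_orderSwitches; infer_instance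

-- ===== CLAIM (what is proved, stated in full; the proofs are below) =====
def Claim_equal_orderSwitches : Prop := ∀ (s : Int) (nSwitches : Int), Dom_orderSwitches s nSwitches → Spec_orderSwitches s nSwitches (orderSwitches s nSwitches)

-- ===== LEMMAS AND PROOFS =====

-- Invariant of A's loop over range(0, k): the dict holds exactly B's closed-form list,
-- and the counter equals k (if s was skipped so far) or k+1.
theorem orderSwitches_invariant (s : Int) (k : Nat) :
    ((PySem.List.pyRange 0 (k : Int) 1).foldl
      (fun (st : PySem.Dict Int Int × Int) i =>
        if i ≠ s then (st.1.insert i st.2, st.2 + 1) else st)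
      (PySem.Dict.empty, 1))
    = (PySem.Dict.mk (orderSwitches_alt s (k : Int)),
       if 0 ≤ s ∧ s < (k : Int) then (k : Int) else (k : Int) + 1) := by
  induction k with
  | zero =>
      simp [orderSwitches_alt, PySem.Dict.empty]
  | succ k ih =>
      have hk : ((k + 1 : Nat) : Int) = (k : Int) + 1 := by push_cast; ring
      rw [hk, PySem.List.pyRange_one_succ_right (by positivity), List.foldl_append, ih]
      simp only [List.foldl_cons, List.foldl_nil]
      by_cases hks : (k : Int) = s
      · -- i = s : skipped; range 0 (k+1) keeps the same kept elements
        have halt : orderSwitches_alt s ((k : Int) + 1) = orderSwitches_alt s (k : Int) := by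
          rw [orderSwitches_alt, orderSwitches_alt,
              PySem.List.pyRange_one_succ_right (by positivity), List.filter_append]
          simp [hks]
        rw [if_neg (by simp [hks]), halt]
        refine Prod.ext rfl ?_
        show (if 0 ≤ s ∧ s < (k : Int) then (k : Int) else (k : Int) + 1)
          = (if 0 ≤ s ∧ s < (k : Int) + 1 then (k : Int) + 1 else ((k : Int) + 1) + 1)
        split_ifs with h1 h2 <;> omega
      · -- i ≠ s : inserted with the current counter
        have hfresh : (PySem.Dict.mk (orderSwitches_alt s (k : Int))).contains (k : Int) = false := by
          simp [PySem.Dict.contains_mk, orderSwitches_alt, PySem.List.mem_pyRange_one]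
          intros
          omega
        have halt : orderSwitches_alt s ((k : Int) + 1)
            = orderSwitches_alt s (k : Int)
              ++ [((k : Int), if 0 ≤ s ∧ s < (k : Int) then (k : Int) else (k : Int) + 1)] := by
          rw [orderSwitches_alt, orderSwitches_alt,
              PySem.List.pyRange_one_succ_right (by positivity), List.filter_append]
          simp [hks]
        rw [if_pos hks, halt]
        refine Prod.ext ?_ ?_
        · show (PySem.Dict.mk (orderSwitches_alt s (k:Int))).insert (k:Int) _
            = PySem.Dict.mk (orderSwitches_alt s (k:Int) ++ [((k:Int), _)])
          apply PySem.Dict.ext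
          rw [PySem.Dict.items_insert]
          simp [hfresh]
        · show (if 0 ≤ s ∧ s < (k : Int) then (k : Int) else (k : Int) + 1) + 1
            = (if 0 ≤ s ∧ s < (k : Int) + 1 then (k : Int) + 1 else ((k : Int) + 1) + 1)
          split_ifs with h1 h2 <;> omega

-- ===== VERDICT (by name: the statement is the Claim_ definition above) =====
theorem orderSwitches_spec : Claim_equal_orderSwitches := by
  intro s n _
  unfold Spec_orderSwitches orderSwitches
  by_cases hn : 0 ≤ n
  · have : n = ((n.toNat : Int)) := by omega
    rw [this]
    simp only [orderSwitches_invariant s n.toNat]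
  · have h0 : PySem.List.pyRange 0 n 1 = [] := by
      simp [PySem.List.pyRange_one]
      omega
    simp [h0, orderSwitches_alt, PySem.Dict.empty]
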